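-- pv_equiv track=rewrite | github.com/seacow-technology/agentos | scripts/gates/gate_no_duplicate_tables.py | check_table_name_conflicts
-- ===== SOURCE A (Python) =====
-- from typing import List, Dict, Set
--
-- def check_table_name_conflicts(tables: List[str]) -> Dict[str, List[str]]:
--     """Check for similar table names that might indicate duplication."""
--     conflicts = {}
--
--     # Check for variations of common table names
--     base_names = {
--         'session': ['session', 'sessions', 'chat_session', 'chat_sessions'],
--         'message': ['message', 'messages', 'chat_message', 'chat_messages'],
--         'task': ['task', 'tasks'],
--         'user': ['user', 'users'],
--         'agent': ['agent', 'agents'],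
--     }
--
--     for base, variations in base_names.items():
--         matching = [
--             t for t in tables
--             for v in variations
--             if t.lower() == v and not t.endswith('_legacy')
--         ]
--         if len(matching) > 1:
--             conflicts[base] = matching
--
--     return conflicts
-- ===== SOURCE B (Python) =====
-- def check_table_name_conflicts(tables):
--     """Check for similar table names that might indicate duplication."""
--     # One pass over tables with five explicit accumulators (first-match elif
--     # chain is exact because the five variation sets are pairwise disjoint).
--     ses, msg, tsk, usr, agt = [], [], [], [], []
--     for t in tables:
--         if t.endswith('_legacy'):
--             continue
--         s = t.lower()
--         if s in ('session', 'sessions', 'chat_session', 'chat_sessions'):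
--             ses.append(t)
--         elif s in ('message', 'messages', 'chat_message', 'chat_messages'):
--             msg.append(t)
--         elif s in ('task', 'tasks'):
--             tsk.append(t)
--         elif s in ('user', 'users'):
--             usr.append(t)
--         elif s in ('agent', 'agents'):
--             agt.append(t)
--     return {b: g
--             for b, g in (('session', ses), ('message', msg), ('task', tsk),
--                          ('user', usr), ('agent', agt))
--             if len(g) > 1}
-- ===== Notes on version B (the rewrite author's own statement) =====
-- stated objective: faster
-- what changed: Replaces A's five rescans of the tables list (a nested tables-by-variations comprehension per base, plus dict building) with a single pass over tables that dispatches each name into one of five explicit accumulator lists via a first-match elif chain (exact since the variation sets are disjoint), then a length>1 filter over the five (base, group) pairs.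
import Mathlib
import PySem

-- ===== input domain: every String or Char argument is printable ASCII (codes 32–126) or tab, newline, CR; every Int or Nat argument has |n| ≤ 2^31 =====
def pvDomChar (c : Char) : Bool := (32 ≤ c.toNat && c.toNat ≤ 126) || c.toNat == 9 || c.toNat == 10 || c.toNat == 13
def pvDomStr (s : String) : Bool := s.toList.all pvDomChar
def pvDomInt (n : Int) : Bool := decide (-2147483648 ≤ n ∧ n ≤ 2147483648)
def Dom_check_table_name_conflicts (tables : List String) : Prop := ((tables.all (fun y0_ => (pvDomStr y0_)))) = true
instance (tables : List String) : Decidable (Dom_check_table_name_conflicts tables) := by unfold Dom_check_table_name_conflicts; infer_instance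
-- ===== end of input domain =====

-- B replaces A's five nested rescans of `tables` (one tables×variations comprehension per base)
-- by ONE pass over `tables` with five explicit accumulator lists and a first-match elif chain
-- (exact because the five variation sets are pairwise disjoint).

-- ===== PORT A =====
def pvBaseNamesA : List (String × List String) :=
  [("session", ["session", "sessions", "chat_session", "chat_sessions"]),
   ("message", ["message", "messages", "chat_message", "chat_messages"]),
   ("task", ["task", "tasks"]),
   ("user", ["user", "users"]),
   ("agent", ["agent", "agents"])]

-- [t for t in tables for v in variations if t.lower() == v and not t.endswith('_legacy')]
def pvMatchingA (tables : List String) (variations : List String) : List String :=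
  tables.flatMap (fun t =>
    (variations.filter (fun v =>
      PySem.Str.lower t == v && !(PySem.Str.endswith t "_legacy"))).map (fun _ => t))

def check_table_name_conflicts (tables : List String) : List (String × List String) :=
  (pvBaseNamesA.foldl (fun conflicts p =>
      let matching := pvMatchingA tables p.2
      if matching.length > 1 then conflicts.insert p.1 matching else conflicts)
    (PySem.Dict.empty : PySem.Dict String (List String))).items

-- ===== PORT B =====
-- the five variation tuples B tests membership against
def pvV1 : List String := ["session", "sessions", "chat_session", "chat_sessions"]
def pvV2 : List String := ["message", "messages", "chat_message", "chat_messages"]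
def pvV3 : List String := ["task", "tasks"]
def pvV4 : List String := ["user", "users"]
def pvV5 : List String := ["agent", "agents"]

-- state of B's loop: the five accumulators (ses, msg, tsk, usr, agt)
def pvAcc : Type := List String × List String × List String × List String × List String

-- the body of B's single for-loop (continue on '_legacy', then the elif chain)
def pvStepB (st : pvAcc) (t : String) : pvAcc :=
  if PySem.Str.endswith t "_legacy" then st
  else
    let s := PySem.Str.lower t
    let (ses, msg, tsk, usr, agt) := st
    if s ∈ pvV1 then (ses ++ [t], msg, tsk, usr, agt)
    else if s ∈ pvV2 then (ses, msg ++ [t], tsk, usr, agt)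
    else if s ∈ pvV3 then (ses, msg, tsk ++ [t], usr, agt)
    else if s ∈ pvV4 then (ses, msg, tsk, usr ++ [t], agt)
    else if s ∈ pvV5 then (ses, msg, tsk, usr, agt ++ [t])
    else st

-- the final dict comprehension: the five keys are distinct literals, so the resulting
-- dict's items are exactly the kept (base, group) pairs in this order
def check_table_name_conflicts_alt (tables : List String) : List (String × List String) :=
  match tables.foldl pvStepB ([], [], [], [], []) with
  | (ses, msg, tsk, usr, agt) =>
    (if ses.length > 1 then [("session", ses)] else []) ++
    (if msg.length > 1 then [("message", msg)] else []) ++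
    (if tsk.length > 1 then [("task", tsk)] else []) ++
    (if usr.length > 1 then [("user", usr)] else []) ++
    (if agt.length > 1 then [("agent", agt)] else [])

-- ===== PRECONDITION & SPEC =====
def Spec_check_table_name_conflicts (tables : List String) (out : List (String × List String)) : Prop := out = check_table_name_conflicts_alt tables
instance (tables : List String) (out : List (String × List String)) : Decidable (Spec_check_table_name_conflicts tables out) := by unfold Spec_check_table_name_conflicts; infer_instance

-- ===== CLAIM =====
def Claim_equal_check_table_name_conflicts : Prop := ∀ (tables : List String), Dom_check_table_name_conflicts tables → Spec_check_table_name_conflicts tables (check_table_name_conflicts tables)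

-- ===== LEMMAS AND PROOFS =====

-- the membership predicate B tests, as a Bool predicate on a table name
def pvHit (vars : List String) (t : String) : Bool :=
  decide (PySem.Str.lower t ∈ vars) && !(PySem.Str.endswith t "_legacy")

-- A's inner comprehension contributes, per table t, exactly [t] when pvHit, else []
lemma pvInnerA (vars : List String) (hnd : vars.Nodup) (t : String) :
    (vars.filter (fun v =>
      PySem.Str.lower t == v && !(PySem.Str.endswith t "_legacy"))).map (fun _ => t)
    = if pvHit vars t then [t] else [] := by
  by_cases hl : PySem.Str.endswith t "_legacy" = true
  · have h0 : ∀ v : String, (PySem.Str.lower t == v && !(PySem.Str.endswith t "_legacy")) = false := by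
      intro v; rw [hl]; simp
    rw [List.filter_congr (fun v _ => h0 v), List.filter_false, List.map_nil]
    simp only [pvHit, hl, Bool.not_true, Bool.and_false, Bool.false_eq_true, if_false]
  · rw [Bool.not_eq_true] at hl
    by_cases hm : PySem.Str.lower t ∈ vars
    · have hpred : ∀ v : String, (PySem.Str.lower t == v && !(PySem.Str.endswith t "_legacy"))
          = (v == PySem.Str.lower t) := by
        intro v; rw [hl]; simp [Bool.beq_comm]
      -- the nodup variation list contains the lowered name once, so the filter is a singleton
      rw [funext hpred, List.filter_beq, List.count_eq_one_of_mem hnd hm, List.replicate_one,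
        List.map_cons, List.map_nil]
      simp only [pvHit, hl, hm, Bool.not_false, Bool.and_true, decide_true, if_true]
    · rw [List.filter_eq_nil_iff.mpr, List.map_nil]
      · simp only [pvHit, hm, decide_false, Bool.false_and, Bool.false_eq_true, if_false]
      · intro v hv
        rw [hl]
        simp only [Bool.not_false, Bool.and_true, beq_iff_eq]
        intro he; exact hm (he ▸ hv)

-- hence A's per-base matching list is a plain filter of tables
lemma pvMatchingA_eq_filter (tables vars : List String) (hnd : vars.Nodup) :
    pvMatchingA tables vars = tables.filter (pvHit vars) := by
  induction tables with
  | nil => rfl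
  | cons t ts ih =>
      simp only [pvMatchingA, List.flatMap_cons] at *
      rw [pvInnerA vars hnd t, ih, List.filter_cons]
      by_cases h : pvHit vars t = true <;> simp [h]

-- the five variation sets are pairwise disjoint (first-match dispatch is exact)
lemma pvDisj1 (s : String) (h : s ∈ pvV1) : s ∉ pvV2 ∧ s ∉ pvV3 ∧ s ∉ pvV4 ∧ s ∉ pvV5 := by
  simp only [pvV1, List.mem_cons, List.not_mem_nil, or_false] at h
  rcases h with h|h|h|h <;> subst h <;> decide

lemma pvDisj2 (s : String) (h : s ∈ pvV2) : s ∉ pvV3 ∧ s ∉ pvV4 ∧ s ∉ pvV5 := by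
  simp only [pvV2, List.mem_cons, List.not_mem_nil, or_false] at h
  rcases h with h|h|h|h <;> subst h <;> decide

lemma pvDisj3 (s : String) (h : s ∈ pvV3) : s ∉ pvV4 ∧ s ∉ pvV5 := by
  simp only [pvV3, List.mem_cons, List.not_mem_nil, or_false] at h
  rcases h with h|h <;> subst h <;> decide

lemma pvDisj4 (s : String) (h : s ∈ pvV4) : s ∉ pvV5 := by
  simp only [pvV4, List.mem_cons, List.not_mem_nil, or_false] at h
  rcases h with h|h <;> subst h <;> decide

-- one step of B's loop appends to each accumulator exactly its pvHit contribution
lemma pvStepB_eq (st : pvAcc) (t : String) :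
    pvStepB st t =
      (st.1 ++ (if pvHit pvV1 t then [t] else []),
       st.2.1 ++ (if pvHit pvV2 t then [t] else []),
       st.2.2.1 ++ (if pvHit pvV3 t then [t] else []),
       st.2.2.2.1 ++ (if pvHit pvV4 t then [t] else []),
       st.2.2.2.2 ++ (if pvHit pvV5 t then [t] else [])) := by
  obtain ⟨a1, a2, a3, a4, a5⟩ := st
  by_cases hl : PySem.Str.endswith t "_legacy" = true
  · simp only [pvStepB, pvHit, hl, if_true, Bool.not_true, Bool.and_false, Bool.false_eq_true,
      if_false, List.append_nil]
  · rw [Bool.not_eq_true] at hl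
    simp only [pvStepB, pvHit, hl, Bool.false_eq_true, if_false, Bool.not_false, Bool.and_true]
    by_cases h1 : PySem.Str.lower t ∈ pvV1
    · obtain ⟨h2, h3, h4, h5⟩ := pvDisj1 _ h1
      simp [h1, h2, h3, h4, h5]
    · by_cases h2 : PySem.Str.lower t ∈ pvV2
      · obtain ⟨h3, h4, h5⟩ := pvDisj2 _ h2
        simp [h1, h2, h3, h4, h5]
      · by_cases h3 : PySem.Str.lower t ∈ pvV3
        · obtain ⟨h4, h5⟩ := pvDisj3 _ h3
          simp [h1, h2, h3, h4, h5]
        · by_cases h4 : PySem.Str.lower t ∈ pvV4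
          · have h5 := pvDisj4 _ h4
            simp [h1, h2, h3, h4, h5]
          · by_cases h5 : PySem.Str.lower t ∈ pvV5 <;> simp [h1, h2, h3, h4, h5]

-- B's whole loop computes the five filters
lemma pvFoldB (tables : List String) (a1 a2 a3 a4 a5 : List String) :
    tables.foldl pvStepB (a1, a2, a3, a4, a5) =
      (a1 ++ tables.filter (pvHit pvV1), a2 ++ tables.filter (pvHit pvV2),
       a3 ++ tables.filter (pvHit pvV3), a4 ++ tables.filter (pvHit pvV4),
       a5 ++ tables.filter (pvHit pvV5)) := by
  induction tables generalizing a1 a2 a3 a4 a5 with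
  | nil => simp
  | cons t ts ih =>
      rw [List.foldl_cons, pvStepB_eq, ih]
      simp only [List.filter_cons]
      by_cases c1 : pvHit pvV1 t = true <;> by_cases c2 : pvHit pvV2 t = true <;>
        by_cases c3 : pvHit pvV3 t = true <;> by_cases c4 : pvHit pvV4 t = true <;>
        by_cases c5 : pvHit pvV5 t = true <;>
        simp [c1, c2, c3, c4, c5]

-- ===== VERDICT =====
theorem check_table_name_conflicts_spec : Claim_equal_check_table_name_conflicts := by
  intro tables _
  unfold Spec_check_table_name_conflicts check_table_name_conflicts check_table_name_conflicts_alt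
  rw [pvFoldB tables [] [] [] [] []]
  simp only [List.nil_append, pvBaseNamesA, List.foldl_cons, List.foldl_nil, pvV1, pvV2, pvV3,
    pvV4, pvV5]
  rw [pvMatchingA_eq_filter tables _ (by decide), pvMatchingA_eq_filter tables _ (by decide),
      pvMatchingA_eq_filter tables _ (by decide), pvMatchingA_eq_filter tables _ (by decide),
      pvMatchingA_eq_filter tables _ (by decide)]
  split_ifs <;> rfl
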